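-- pv_equiv track=rewrite | github.com/ShinWon-Chul/AlgorithmWithPython | programmers/PCCP_모의고사/[PCCP 모의고사 1회] 1번.py | solution
-- ===== SOURCE A (Python) =====
-- def solution(input_string):
--     prev_loc = {}
--     res = ''
--     for i in range(len(input_string)):
--         if input_string[i] not in prev_loc:
--             prev_loc[input_string[i]] = i
--         else:
--             if prev_loc[input_string[i]] != i-1:
--                 if input_string[i] not in res:
--                     res+= input_string[i]
--             else:
--                 prev_loc[input_string[i]] = i
--     res = list(res)
--     res.sort()
--     if res:
--         return ''.join(res)
--     else:
--         return 'N'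
-- ===== SOURCE B (Python) =====
-- def solution(input_string):
--     # Count maximal consecutive runs per character in one pass, then keep
--     # the characters that form at least two runs.
--     runs = {}
--     prev = None
--     for ch in input_string:
--         if ch != prev:
--             runs[ch] = runs.get(ch, 0) + 1
--         prev = ch
--     result = sorted(c for c in runs if runs[c] >= 2)
--     return ''.join(result) if result else 'N'
-- ===== Notes on version B (the rewrite author's own statement) =====
-- stated objective: simpler
-- what changed: A tracks the last refreshed index of each char in a dict and appends a char to an accumulator string when it reappears at a non-adjacent position; B instead counts, in one prev-char pass, how many maximal consecutive runs each char has and keeps the chars with at least two runs.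
import Mathlib
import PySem

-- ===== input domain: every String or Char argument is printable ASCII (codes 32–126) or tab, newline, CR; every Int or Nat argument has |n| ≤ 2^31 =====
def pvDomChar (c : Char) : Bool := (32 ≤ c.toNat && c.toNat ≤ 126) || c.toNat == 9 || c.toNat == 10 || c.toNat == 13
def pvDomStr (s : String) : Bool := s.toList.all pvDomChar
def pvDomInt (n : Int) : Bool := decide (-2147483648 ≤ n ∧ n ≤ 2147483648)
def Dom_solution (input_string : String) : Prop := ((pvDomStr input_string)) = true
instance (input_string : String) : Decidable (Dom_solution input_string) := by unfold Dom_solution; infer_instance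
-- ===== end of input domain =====

-- B replaces A's last-position dict + membership-checked accumulator string by a
-- one-pass count of maximal consecutive runs per character (chars with >= 2 runs win):
-- a simpler decision rule, same exact results.


-- ===== PORT A =====
-- loop body of A's 'for i in range(len(input_string))'; state = (prev_loc, res)
def stepA (st : PySem.Dict Char Int × List Char) (p : Int × Char) :
    PySem.Dict Char Int × List Char :=
  match st.1.get? p.2 with
  | none => (st.1.insert p.2 p.1, st.2)                 -- input_string[i] not in prev_loc
  | some j =>
      if j ≠ p.1 - 1 then
        (if p.2 ∈ st.2 then st else (st.1, st.2 ++ [p.2]))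
      else (st.1.insert p.2 p.1, st.2)

def solution (input_string : String) : String :=
  let cs := input_string.toList
  let st := (PySem.List.pyRange 0 (PySem.List.len cs) 1).foldl
      (fun st i => stepA st (i, PySem.List.pyGetD cs i ' ')) (PySem.Dict.empty, [])
  let res := PySem.List.sorted st.2 (fun x => x) false   -- res = list(res); res.sort()
  if res ≠ [] then String.ofList res else "N"

-- ===== PORT B =====
-- loop body of B's 'for ch in input_string'; state = (runs, prev)
def stepB (st : PySem.Dict Char Int × Option Char) (ch : Char) :
    PySem.Dict Char Int × Option Char :=
  ((if some ch ≠ st.2 then st.1.insert ch (st.1.getD ch 0 + 1) else st.1), some ch)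

def solution_alt (input_string : String) : String :=
  let st := input_string.toList.foldl stepB (PySem.Dict.empty, none)
  let result := PySem.List.sorted
      ((PySem.Dict.keys st.1).filter (fun c => decide (2 ≤ st.1.getD c 0))) (fun x => x) false
  if result ≠ [] then String.ofList result else "N"

-- ===== PRECONDITION & SPEC =====
def Spec_solution (input_string : String) (out : String) : Prop := out = solution_alt input_string
instance (input_string : String) (out : String) : Decidable (Spec_solution input_string out) := by unfold Spec_solution; infer_instance

-- ===== CLAIM (what is proved, stated in full; the proofs are below) =====
def Claim_equal_solution : Prop := ∀ (input_string : String), Dom_solution input_string → Spec_solution input_string (solution input_string)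

-- ===== LEMMAS AND PROOFS =====

-- number of maximal consecutive runs of c in l, given the char just before l (if any)
def runsFrom (pv : Option Char) : List Char → Char → Nat
  | [], _ => 0
  | x :: xs, c => (if x = c ∧ some x ≠ pv then 1 else 0) + runsFrom (some x) xs c

lemma runsFrom_eq_zero_of_not_mem (pv : Option Char) (l : List Char) (c : Char)
    (h : c ∉ l) : runsFrom pv l c = 0 := by
  induction l generalizing pv with
  | nil => rfl
  | cons x xs ih =>
      simp only [List.mem_cons, not_or] at h
      have hcond : ¬(x = c ∧ some x ≠ pv) := fun ⟨e, _⟩ => h.1 e.symm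
      simp [runsFrom, hcond, ih (some x) h.2]

-- A's loop as structural recursion over the list with an explicit index
def foldA : List Char → Int → (PySem.Dict Char Int × List Char) → (PySem.Dict Char Int × List Char)
  | [], _, st => st
  | x :: xs, i, st => foldA xs (i + 1) (stepA st (i, x))

lemma foldl_enumerate_eq_foldA (l : List Char) (i : Int) (st : PySem.Dict Char Int × List Char) :
    (PySem.List.enumerate l i).foldl stepA st = foldA l i st := by
  induction l generalizing i st with
  | nil => rfl
  | cons x xs ih => simp [PySem.List.enumerate_cons, foldA, ih]

-- A's loop invariant: n c = number of runs of c in the processed prefix, pv its last char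
lemma A_loop_inv (l : List Char) (i : Int) (d : PySem.Dict Char Int) (res : List Char)
    (n : Char → Nat) (pv : Option Char)
    (h1 : ∀ c, c ∈ res ↔ 2 ≤ n c)
    (h2 : ∀ c, n c = 0 ↔ d.get? c = none)
    (h3 : ∀ c, n c = 1 → ∃ j, d.get? c = some j ∧ j < i ∧ (j = i - 1 ↔ pv = some c))
    (h4 : ∀ c, pv = some c → 1 ≤ n c)
    (h5 : res.Nodup) :
    (∀ c, c ∈ (foldA l i (d, res)).2 ↔ 2 ≤ n c + runsFrom pv l c) ∧ (foldA l i (d, res)).2.Nodup := by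
  induction l generalizing i d res n pv with
  | nil =>
      refine ⟨fun c => ?_, h5⟩
      simpa [foldA, runsFrom] using h1 c
  | cons x xs ih =>
      have key : ∀ c, n c + runsFrom pv (x :: xs) c
          = (n c + (if x = c ∧ some x ≠ pv then 1 else 0)) + runsFrom (some x) xs c := by
        intro c; simp only [runsFrom]; omega
      set n' : Char → Nat := fun c => n c + (if x = c ∧ some x ≠ pv then 1 else 0) with hn'
      have hle : ∀ c, n c ≤ n' c := fun c => Nat.le_add_right _ _
      have hxn' : ∀ c, c ≠ x → n' c = n c := by
        intro c hc
        have : ¬(x = c ∧ some x ≠ pv) := fun ⟨e, _⟩ => hc e.symm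
        simp [hn', this]
      -- after proving the invariant for the new state, the IH closes the goal
      suffices hstep : ∃ d' res', stepA (d, res) (i, x) = (d', res') ∧
          (∀ c, c ∈ res' ↔ 2 ≤ n' c) ∧
          (∀ c, n' c = 0 ↔ d'.get? c = none) ∧
          (∀ c, n' c = 1 → ∃ j, d'.get? c = some j ∧ j < i + 1 ∧ (j = (i + 1) - 1 ↔ some x = some c)) ∧
          (∀ c, some x = some c → 1 ≤ n' c) ∧ res'.Nodup by
        obtain ⟨d', res', hst, g1, g2, g3, g4, g5⟩ := hstep
        have := ih (i + 1) d' res' n' (some x) g1 g2 g3 g4 g5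
        refine ⟨fun c => ?_, ?_⟩
        · rw [key c]
          simpa [foldA, hst] using this.1 c
        · simpa [foldA, hst] using this.2
      by_cases hx : d.get? x = none
      · -- first occurrence of x
        have hnx : n x = 0 := (h2 x).2 hx
        have hpv : some x ≠ pv := by
          intro h; have := h4 x h.symm; omega
        have hn'x : n' x = 1 := by
          simp [hn', hpv, hnx]
        refine ⟨d.insert x i, res, by simp [stepA, hx], ?_, ?_, ?_, ?_, h5⟩
        · intro c
          by_cases hc : c = x
          · subst hc; simp [h1, hnx, hn'x]
          · rw [hxn' c hc]; exact h1 c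
        · intro c
          by_cases hc : c = x
          · subst hc; simp [PySem.Dict.get?_insert_self, hn'x]
          · rw [hxn' c hc, PySem.Dict.get?_insert_of_ne _ _ hc]; exact h2 c
        · intro c hc
          by_cases hcx : c = x
          · subst hcx
            refine ⟨i, by simp [PySem.Dict.get?_insert_self], by omega, ?_⟩
            constructor
            · intro _; rfl
            · intro _; omega
          · rw [hxn' c hcx] at hc
            obtain ⟨j, hj, hji, _⟩ := h3 c hc
            refine ⟨j, by rw [PySem.Dict.get?_insert_of_ne _ _ hcx]; exact hj, by omega, ?_⟩
            constructor
            · intro h; exact absurd h (by omega)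
            · intro h; exact absurd (Option.some.inj h) (fun e => hcx e.symm)
        · intro c hc
          have hcx : c = x := (Option.some.inj hc).symm
          subst hcx; omega
      · obtain ⟨j, hj⟩ := Option.ne_none_iff_exists'.mp hx
        have hnx : 1 ≤ n x := by
          by_contra h
          exact hx ((h2 x).1 (by omega))
        by_cases hji : j = i - 1
        · -- consecutive repeat: refresh prev_loc[x]
          subst hji
          have hcase : (n x = 1 ∧ n' x = 1) ∨ (2 ≤ n x ∧ 2 ≤ n' x) := by
            by_cases h1x : n x = 1
            · left
              obtain ⟨j', hj', _, hiff⟩ := h3 x h1x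
              rw [hj] at hj'
              have hjj : i - 1 = j' := Option.some.inj hj'
              have hpv : pv = some x := hiff.1 (by omega)
              refine ⟨h1x, ?_⟩
              simp [hn', h1x, hpv]
            · right
              exact ⟨by omega, le_trans (by omega) (hle x)⟩
          refine ⟨d.insert x i, res, by simp [stepA, hj], ?_, ?_, ?_, ?_, h5⟩
          · intro c
            by_cases hc : c = x
            · subst hc
              rcases hcase with ⟨ha, hb⟩ | ⟨ha, hb⟩ <;> simp [h1, ha, hb]
            · rw [hxn' c hc]; exact h1 c
          · intro c
            by_cases hc : c = x
            · subst hc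
              simp only [PySem.Dict.get?_insert_self]
              have := hle c
              constructor
              · intro h; omega
              · intro h; exact absurd h (by simp)
            · rw [hxn' c hc, PySem.Dict.get?_insert_of_ne _ _ hc]; exact h2 c
          · intro c hc
            by_cases hcx : c = x
            · subst hcx
              refine ⟨i, by simp [PySem.Dict.get?_insert_self], by omega, ?_⟩
              constructor
              · intro _; rfl
              · intro _; omega
            · rw [hxn' c hcx] at hc
              obtain ⟨j', hj', hji', _⟩ := h3 c hc
              refine ⟨j', by rw [PySem.Dict.get?_insert_of_ne _ _ hcx]; exact hj', by omega, ?_⟩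
              constructor
              · intro h; exact absurd h (by omega)
              · intro h; exact absurd (Option.some.inj h) (fun e => hcx e.symm)
          · intro c hc
            have hcx : c = x := (Option.some.inj hc).symm
            subst hcx; omega
        · -- non-adjacent repeat: collect x (if new)
          by_cases hres : x ∈ res
          · have hnx2 : 2 ≤ n x := (h1 x).1 hres
            have hn'x : 2 ≤ n' x := le_trans hnx2 (hle x)
            refine ⟨d, res, by simp [stepA, hj, hji, hres], ?_, ?_, ?_, ?_, h5⟩
            · intro c
              by_cases hc : c = x
              · subst hc; simp [hres, hn'x]
              · rw [hxn' c hc]; exact h1 c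
            · intro c
              by_cases hc : c = x
              · subst hc
                simp only [hj]
                constructor
                · intro h; omega
                · intro h; exact absurd h (by simp)
              · rw [hxn' c hc]; exact h2 c
            · intro c hc
              by_cases hcx : c = x
              · subst hcx; omega
              · rw [hxn' c hcx] at hc
                obtain ⟨j', hj', hji', _⟩ := h3 c hc
                refine ⟨j', hj', by omega, ?_⟩
                constructor
                · intro h; exact absurd h (by omega)
                · intro h; exact absurd (Option.some.inj h) (fun e => hcx e.symm)
            · intro c hc
              have hcx : c = x := (Option.some.inj hc).symm
              subst hcx; omega
          · -- x had exactly one run so far, a second one starts here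
            have hlt : ¬ 2 ≤ n x := fun h => hres ((h1 x).2 h)
            have hnx1 : n x = 1 := by omega
            obtain ⟨j', hj', _, hiff⟩ := h3 x hnx1
            rw [hj] at hj'
            have hjj : j = j' := Option.some.inj hj'
            have hpv : pv ≠ some x := fun h => hji (by have := hiff.2 h; omega)
            have hn'x : n' x = 2 := by
              simp [hn', hnx1, Ne.symm hpv]
            refine ⟨d, res ++ [x], by simp [stepA, hj, hji, hres], ?_, ?_, ?_, ?_, ?_⟩
            · intro c
              by_cases hc : c = x
              · subst hc; simp [hn'x]
              · rw [hxn' c hc]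
                simp only [List.mem_append, List.mem_singleton]
                constructor
                · rintro (h | h)
                  · exact (h1 c).1 h
                  · exact absurd h hc
                · intro h; exact Or.inl ((h1 c).2 h)
            · intro c
              by_cases hc : c = x
              · subst hc
                simp only [hj]
                constructor
                · intro h; omega
                · intro h; exact absurd h (by simp)
              · rw [hxn' c hc]; exact h2 c
            · intro c hc
              by_cases hcx : c = x
              · subst hcx; omega
              · rw [hxn' c hcx] at hc
                obtain ⟨j2, hj2, hji2, _⟩ := h3 c hc
                refine ⟨j2, hj2, by omega, ?_⟩
                constructor
                · intro h; exact absurd h (by omega)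
                · intro h; exact absurd (Option.some.inj h) (fun e => hcx e.symm)
            · intro c hc
              have hcx : c = x := (Option.some.inj hc).symm
              subst hcx; omega
            · refine List.Nodup.append h5 (List.nodup_singleton x) ?_
              intro a ha hb
              rw [List.mem_singleton] at hb
              subst hb; exact hres ha

-- characterization of A's collected chars
lemma A_res_spec (cs : List Char) :
    (∀ c, c ∈ (foldA cs 0 (PySem.Dict.empty, [])).2 ↔ 2 ≤ runsFrom none cs c) ∧
    (foldA cs 0 (PySem.Dict.empty, [])).2.Nodup := by
  have := A_loop_inv cs 0 PySem.Dict.empty [] (fun _ => 0) none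
    (by simp) (by simp [PySem.Dict.get?_empty]) (by intro c h; simp at h) (by intro c h; simp at h)
    (by simp)
  simpa using this

-- B's loop: the dict holds exactly the run counts
lemma B_loop_getD (l : List Char) (d : PySem.Dict Char Int) (pv : Option Char) (c : Char) :
    (l.foldl stepB (d, pv)).1.getD c 0 = d.getD c 0 + (runsFrom pv l c : Int) := by
  induction l generalizing d pv with
  | nil => simp [runsFrom]
  | cons x xs ih =>
      show (xs.foldl stepB (stepB (d, pv) x)).1.getD c 0 = _
      by_cases hpv : some x ≠ pv
      · rw [show stepB (d, pv) x = (d.insert x (d.getD x 0 + 1), some x) by simp [stepB, hpv]]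
        rw [ih]
        by_cases hc : c = x
        · subst hc
          rw [PySem.Dict.getD_insert_self]
          have hr : runsFrom pv (c :: xs) c = 1 + runsFrom (some c) xs c := by
            simp [runsFrom, hpv]
          rw [hr]; push_cast; ring
        · rw [PySem.Dict.getD_insert_of_ne _ _ _ hc]
          have hcond : ¬(x = c ∧ some x ≠ pv) := fun ⟨e, _⟩ => hc e.symm
          simp [runsFrom, hcond]
      · rw [show stepB (d, pv) x = (d, some x) by simp [stepB, hpv]]
        rw [ih]
        have hpv' : some x = pv := of_not_not hpv
        have hcond : ¬(x = c ∧ some x ≠ pv) := fun ⟨_, h⟩ => h hpv'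
        simp [runsFrom, hcond]

lemma B_loop_mem_keys (l : List Char) (d : PySem.Dict Char Int) (pv : Option Char)
    (hpv0 : ∀ c, pv = some c → c ∈ d.keys) (c : Char) :
    c ∈ (l.foldl stepB (d, pv)).1.keys ↔ c ∈ d.keys ∨ c ∈ l := by
  induction l generalizing d pv with
  | nil => simp
  | cons x xs ih =>
      show c ∈ (xs.foldl stepB (stepB (d, pv) x)).1.keys ↔ _
      by_cases hpv : some x ≠ pv
      · rw [show stepB (d, pv) x = (d.insert x (d.getD x 0 + 1), some x) by simp [stepB, hpv]]
        rw [ih _ _ (fun c' h => by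
          rw [PySem.Dict.mem_keys_insert]; exact Or.inl (Option.some.inj h).symm)]
        rw [PySem.Dict.mem_keys_insert]
        simp only [List.mem_cons]
        tauto
      · rw [show stepB (d, pv) x = (d, some x) by simp [stepB, hpv]]
        have hpv' : some x = pv := of_not_not hpv
        have hxk : x ∈ d.keys := hpv0 x hpv'.symm
        rw [ih _ _ (fun c' h => by rw [← Option.some.inj h]; exact hxk)]
        simp only [List.mem_cons]
        constructor
        · rintro (h | h)
          · exact Or.inl h
          · exact Or.inr (Or.inr h)
        · rintro (h | h | h)
          · exact Or.inl h
          · subst h; exact Or.inl hxk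
          · exact Or.inr h

lemma B_loop_keys_nodup (l : List Char) (d : PySem.Dict Char Int) (pv : Option Char)
    (h : d.keys.Nodup) : (l.foldl stepB (d, pv)).1.keys.Nodup := by
  induction l generalizing d pv with
  | nil => exact h
  | cons x xs ih =>
      show (xs.foldl stepB (stepB (d, pv) x)).1.keys.Nodup
      by_cases hpv : some x ≠ pv
      · rw [show stepB (d, pv) x = (d.insert x (d.getD x 0 + 1), some x) by simp [stepB, hpv]]
        exact ih _ _ (PySem.Dict.nodup_keys_insert _ _ _ h)
      · rw [show stepB (d, pv) x = (d, some x) by simp [stepB, hpv]]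
        exact ih _ _ h

-- the two collected lists are sorted versions of the same nodup set
lemma sorted_lists_eq (cs : List Char) :
    PySem.List.sorted ((PySem.List.pyRange 0 (PySem.List.len cs) 1).foldl
        (fun st i => stepA st (i, PySem.List.pyGetD cs i ' ')) (PySem.Dict.empty, [])).2
      (fun x => x) false
    = PySem.List.sorted
        ((PySem.Dict.keys (cs.foldl stepB (PySem.Dict.empty, none)).1).filter
          (fun c => decide (2 ≤ (cs.foldl stepB (PySem.Dict.empty, none)).1.getD c 0)))
      (fun x => x) false := by
  have hA : (PySem.List.pyRange 0 (PySem.List.len cs) 1).foldl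
      (fun st i => stepA st (i, PySem.List.pyGetD cs i ' ')) (PySem.Dict.empty, [])
      = foldA cs 0 (PySem.Dict.empty, []) := by
    rw [← foldl_enumerate_eq_foldA, PySem.List.enumerate_eq_map_pyRange cs ' ', List.foldl_map]
  rw [hA]
  set LB := (PySem.Dict.keys (cs.foldl stepB (PySem.Dict.empty, none)).1).filter
      (fun c => decide (2 ≤ (cs.foldl stepB (PySem.Dict.empty, none)).1.getD c 0)) with hLB
  have hBmem : ∀ c, c ∈ LB ↔ 2 ≤ runsFrom none cs c := by
    intro c
    rw [hLB, List.mem_filter]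
    have hk := B_loop_mem_keys cs PySem.Dict.empty none (by intro c h; simp at h) c
    have hg := B_loop_getD cs PySem.Dict.empty none c
    simp only [PySem.Dict.keys_empty, List.not_mem_nil, false_or] at hk
    simp only [PySem.Dict.getD_empty, zero_add] at hg
    rw [hk, hg]
    constructor
    · rintro ⟨_, h⟩
      have := of_decide_eq_true h
      omega
    · intro h
      have hmem : c ∈ cs := by
        by_contra hcm
        rw [runsFrom_eq_zero_of_not_mem none cs c hcm] at h
        omega
      exact ⟨hmem, decide_eq_true (by exact_mod_cast h)⟩
  have hBnd : LB.Nodup :=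
    (B_loop_keys_nodup cs PySem.Dict.empty none (by simp)).filter _
  obtain ⟨hAmem, hAnd⟩ := A_res_spec cs
  apply PySem.List.sorted_eq_sorted_of_perm _ _ _ (fun a b h => h)
  rw [List.perm_ext_iff_of_nodup hAnd hBnd]
  intro c
  rw [hAmem c, hBmem c]

-- ===== VERDICT (by name: the statement is the Claim_ definition above) =====
theorem solution_spec : Claim_equal_solution := by
  intro s _
  unfold Spec_solution solution solution_alt
  simp only [sorted_lists_eq]
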